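-- pv_equiv track=rewrite | github.com/cfevrius/PythonicCodingBat | source/array3.py | fix_45
-- ===== SOURCE A (Python) =====
-- def fix_45(nums):
--     """(This is a slightly harder version of the fix34 problem.) Return an array that contains exactly
--     the same numbers as the given array, but rearranged so that every 4 is immediately followed by
--     a 5. Do not move the 4's, but every other number may move. The array contains the same number
--     of 4's and 5's, and every 4 has a number after it that is not a 4. In this version, 5's may
--     appear anywhere in the original array.
--     """
--     def swap(index1, index2):
--         nums[index1], nums[index2] = nums[index2], nums[index1]
--
--     indices_of_5s = [i for i, val in enumerate(nums) if val == 5]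
--     for index in indices_of_5s:
--         if nums[index - 1] != 4:
--             available_4s = [i
--                             for i, val in enumerate(nums)
--                             if val == 4 and nums[i + 1] != 5]
--             if available_4s:
--                 swap(index, available_4s[0] + 1)
--     return nums
-- ===== SOURCE B (Python) =====
-- def fix_45(nums):
--     """Same rearrangement, but the list of usable 4-positions is computed once and
--     consumed with a single forward pointer instead of being rescanned for every 5."""
--     fives = [i for i, v in enumerate(nums) if v == 5]
--     avail = [i for i, v in enumerate(nums)
--              if v == 4 and i + 1 < len(nums) and nums[i + 1] != 5]
--     k = 0
--     for j in fives:
--         if (j == 0 or nums[j - 1] != 4) and k < len(avail):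
--             p = avail[k]
--             k += 1
--             nums[j], nums[p + 1] = nums[p + 1], nums[j]
--     return nums
-- ===== Notes on version B (the rewrite author's own statement) =====
-- stated objective: alternative
-- what changed: Instead of rescanning the whole array for available 4s at every 5, B computes the list of usable 4-positions once and consumes it with a single monotonically advancing pointer.
-- outside the precondition, e.g. on fix_45([4]): A returns [4], B returns [4]; on fix_45([1, 5, 4, 4, 9, 5]): A returns [1, 4, 5, 5, 9, 4], B returns [1, 4, 4, 5, 5, 9]
import Mathlib
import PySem

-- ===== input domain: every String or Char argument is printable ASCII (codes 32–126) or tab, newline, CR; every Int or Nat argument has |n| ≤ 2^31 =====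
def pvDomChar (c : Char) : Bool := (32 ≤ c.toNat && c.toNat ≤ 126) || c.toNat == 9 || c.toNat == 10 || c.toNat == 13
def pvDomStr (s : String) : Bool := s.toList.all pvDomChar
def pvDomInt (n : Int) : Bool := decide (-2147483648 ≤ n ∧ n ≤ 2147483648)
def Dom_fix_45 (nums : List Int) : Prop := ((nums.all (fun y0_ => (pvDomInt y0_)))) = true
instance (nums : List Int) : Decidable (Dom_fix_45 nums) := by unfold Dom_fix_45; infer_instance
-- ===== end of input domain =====

-- B replaces A's per-5 rescan for available 4s by one precomputed list of usable 4-positions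
-- consumed with a forward pointer.  Both Pythons mutate `nums` in place in the same way; the
-- theorems below are about the returned value.

-- ===== PORT A =====
-- nums[i], nums[j] = nums[j], nums[i]  (exact when both indices are in range, which holds
-- wherever the ports call it under Pre_)
def pySwap (a : List Int) (i j : Int) : List Int :=
  PySem.List.pySetD (PySem.List.pySetD a i (PySem.List.pyGetD a j 0)) j (PySem.List.pyGetD a i 0)

-- literal port of A; the pyGetD at p.1 + 1 defaults where Python raises IndexError (a 4 at the
-- last position), which Pre_fix_45 excludes
def fix_45 (nums : List Int) : List Int :=
  let indices_of_5s := ((PySem.List.enumerate nums).filter (fun p => p.2 == 5)).map (fun p => p.1)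
  indices_of_5s.foldl (fun a index =>
    if PySem.List.pyGetD a (index - 1) 0 != 4 then
      let available_4s := ((PySem.List.enumerate a).filter
          (fun p => p.2 == 4 && PySem.List.pyGetD a (p.1 + 1) 0 != 5)).map (fun p => p.1)
      match available_4s with
      | [] => a
      | p :: _ => pySwap a index (p + 1)
    else a) nums

-- ===== PORT B =====
def fix_45_alt (nums : List Int) : List Int :=
  let fives := ((PySem.List.enumerate nums).filter (fun p => p.2 == 5)).map (fun p => p.1)
  let avail := ((PySem.List.enumerate nums).filter
      (fun p => p.2 == 4 && decide (p.1 + 1 < (nums.length : Int))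
                && PySem.List.pyGetD nums (p.1 + 1) 0 != 5)).map (fun p => p.1)
  (fives.foldl (fun (s : List Int × Nat) j =>
      if (j == 0 || PySem.List.pyGetD s.1 (j - 1) 0 != 4) && s.2 < avail.length then
        (pySwap s.1 j (PySem.List.pyGetD avail (s.2 : Int) 0 + 1), s.2 + 1)
      else s) (nums, 0)).1

-- ===== PRECONDITION & SPEC =====
-- Pre_ is the function's own documented contract: every 4 is followed by an element that is
-- not a 4.  Outside it A can raise IndexError (a 4 in the last position is read past the end
-- once some 5 fires), and where A does return (e.g. on [4], or with adjacent 4s as in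
-- [1, 5, 4, 4, 9, 5]) its value comes from moving 4s around, which the docstring forbids.
def Pre_fix_45 (nums : List Int) : Prop :=
  ∀ i < nums.length, nums.getD i 0 = 4 → i + 1 < nums.length ∧ nums.getD (i + 1) 0 ≠ 4
instance (nums : List Int) : Decidable (Pre_fix_45 nums) := by unfold Pre_fix_45; infer_instance

def pvWitness_fix_45 : List Int := [1, 5, 4, 1, 5, 4, 9]

def Spec_fix_45 (nums : List Int) (out : List Int) : Prop := out = fix_45_alt nums
instance (nums : List Int) (out : List Int) : Decidable (Spec_fix_45 nums out) := by unfold Spec_fix_45; infer_instance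

-- ===== CLAIM (what is proved, stated in full; the proofs are below) =====
def Claim_equal_fix_45 : Prop := ∀ (nums : List Int), Dom_fix_45 nums → Pre_fix_45 nums → Spec_fix_45 nums (fix_45 nums)

-- ===== LEMMAS AND PROOFS =====
lemma enum_filter_map (q : Int → Int → Bool) (a : List Int) : ∀ (s : Int),
    ((PySem.List.enumerate a s).filter (fun p => q p.1 p.2)).map (fun p => p.1)
    = ((List.range a.length).filter (fun (k : Nat) => q (s + (k : Int)) (a.getD k 0))).map
        (fun (k : Nat) => s + (k : Int)) := by
  induction a with
  | nil => intro s; simp [PySem.List.enumerate]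
  | cons x xs ih =>
    intro s
    rw [PySem.List.enumerate_cons]
    simp only [List.length_cons, List.range_succ_eq_map, List.filter_cons, List.filter_map,
      List.getD_cons_zero, Nat.cast_zero, add_zero, List.map_cons, List.map_map,
      Function.comp_def, List.getD_cons_succ, Nat.succ_eq_add_one]
    have e1 : (fun (k : Nat) => q (s + ((k : Int) + 1)) (xs.getD k 0))
        = (fun (k : Nat) => q (s + 1 + (k : Int)) (xs.getD k 0)) := by
      funext k; ring_nf
    have e3 : (fun (k : Nat) => s + ((k : Int) + 1)) = (fun (k : Nat) => s + 1 + (k : Int)) := by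
      funext k; ring
    by_cases h : q s x = true
    · simp only [h, if_pos, List.map_cons, List.map_map, Function.comp_def,
        Nat.succ_eq_add_one]
      push_cast
      rw [e1, e3, ih (s + 1)]
      norm_num
    · simp only [h, Bool.false_eq_true, if_neg, not_false_iff, List.map_map,
        Function.comp_def, Nat.succ_eq_add_one]
      push_cast
      rw [e1, e3, ih (s + 1)]
lemma pyGetD_cast_succ (a : List Int) (k : Nat) : PySem.List.pyGetD a ((k : Int) + 1) 0 = a.getD (k + 1) 0 := by
  have h : ((k : Int) + 1) = ((k + 1 : Nat) : Int) := by push_cast; ring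
  rw [h, PySem.List.pyGetD_natCast]
def condA (a : List Int) (k : Nat) : Bool := (a.getD k 0 == 4) && (a.getD (k + 1) 0 != 5)
def availN (a : List Int) : List Nat := (List.range a.length).filter (condA a)
def fivesN (a : List Int) : List Nat := (List.range a.length).filter (fun k => a.getD k 0 == 5)
lemma avail_of_enum (a : List Int) :
    ((PySem.List.enumerate a).filter
        (fun p => p.2 == 4 && PySem.List.pyGetD a (p.1 + 1) 0 != 5)).map (fun p => p.1)
    = (availN a).map (fun (k : Nat) => (k : Int)) := by
  have h := enum_filter_map (fun i v => (v == 4) && (PySem.List.pyGetD a (i + 1) 0 != 5)) a 0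
  simp only [zero_add] at h
  unfold availN condA
  rw [h]
  simp only [pyGetD_cast_succ]
lemma fives_of_enum (a : List Int) :
    ((PySem.List.enumerate a).filter (fun p => p.2 == 5)).map (fun p => p.1)
    = (fivesN a).map (fun (k : Nat) => (k : Int)) := by
  have h := enum_filter_map (fun _ v => v == 5) a 0
  simp only [zero_add] at h
  unfold fivesN
  rw [h]
lemma getD_set (l : List Int) (i : Nat) (v : Int) (m : Nat) (hi : i < l.length) :
    (l.set i v).getD m 0 = if m = i then v else l.getD m 0 := by
  by_cases hm : m < l.length
  · rw [List.getD_eq_getElem l 0 hm, List.getD_eq_getElem _ 0 (by simpa using hm), List.getElem_set]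
    by_cases h : m = i
    · subst h; simp
    · rw [if_neg h, if_neg (fun he => h he.symm)]
  · have h1 : l.length ≤ m := le_of_not_gt hm
    have h2 : m ≠ i := by omega
    rw [List.getD_eq_default _ _ (by simpa using h1), List.getD_eq_default _ _ h1, if_neg h2]
lemma availB_eq (nums : List Int) (hpre : Pre_fix_45 nums) :
    ((PySem.List.enumerate nums).filter
        (fun p => p.2 == 4 && decide (p.1 + 1 < (nums.length : Int))
                  && PySem.List.pyGetD nums (p.1 + 1) 0 != 5)).map (fun p => p.1)
    = (availN nums).map (fun (k : Nat) => (k : Int)) := by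
  have h := enum_filter_map
    (fun i v => v == 4 && decide (i + 1 < (nums.length : Int))
                && PySem.List.pyGetD nums (i + 1) 0 != 5) nums 0
  simp only [zero_add] at h
  unfold availN
  rw [h]
  congr 1
  apply List.filter_congr
  intro k hk
  have hk' : k < nums.length := List.mem_range.mp hk
  simp only [pyGetD_cast_succ, condA]
  by_cases h4 : nums.getD k 0 = 4
  · have hlt := (hpre k hk' h4).1
    have : ((k : Int) + 1 < (nums.length : Int)) := by exact_mod_cast hlt
    simp [h4, this]
  · have hf : (nums[k]?.getD 0 == 4) = false := by
      rw [← List.getD_eq_getElem?_getD]; exact beq_eq_false_iff_ne.mpr h4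
    simp [hf]
def stepA (a : List Int) (index : Int) : List Int :=
  if PySem.List.pyGetD a (index - 1) 0 != 4 then
    let available_4s := ((PySem.List.enumerate a).filter
        (fun p => p.2 == 4 && PySem.List.pyGetD a (p.1 + 1) 0 != 5)).map (fun p => p.1)
    match available_4s with
    | [] => a
    | p :: _ => pySwap a index (p + 1)
  else a
def stepB (avail : List Int) (s : List Int × Nat) (j : Int) : List Int × Nat :=
  if (j == 0 || PySem.List.pyGetD s.1 (j - 1) 0 != 4) && s.2 < avail.length then
    (pySwap s.1 j (PySem.List.pyGetD avail (s.2 : Int) 0 + 1), s.2 + 1)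
  else s
lemma fix_45_eq (nums : List Int) :
    fix_45 nums = ((fivesN nums).map (fun (k : Nat) => (k : Int))).foldl stepA nums := by
  unfold fix_45
  rw [fives_of_enum]
  rfl
lemma fix_45_alt_eq (nums : List Int) (hpre : Pre_fix_45 nums) :
    fix_45_alt nums
    = (((fivesN nums).map (fun (k : Nat) => (k : Int))).foldl
        (stepB ((availN nums).map (fun (k : Nat) => (k : Int)))) (nums, 0)).1 := by
  unfold fix_45_alt
  rw [fives_of_enum, availB_eq nums hpre]
  rfl
lemma mem_availN (a : List Int) (p : Nat) (h : p ∈ availN a) :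
    p < a.length ∧ a.getD p 0 = 4 ∧ a.getD (p + 1) 0 ≠ 5 := by
  have h' := List.mem_filter.mp h
  refine ⟨List.mem_range.mp h'.1, ?_, ?_⟩
  · have := h'.2
    unfold condA at this
    simpa using (Bool.and_elim_left this)
  · have := h'.2
    unfold condA at this
    simpa using (Bool.and_elim_right this)
lemma nodup_availN (a : List Int) : (availN a).Nodup := (List.nodup_range).filter _
lemma drop_cons_getD {l : List Nat} {k p : Nat} {rest : List Nat} (h : l.drop k = p :: rest) :
    l.getD k 0 = p := by
  have h0 : (l.drop k)[0]? = some p := by rw [h]; rfl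
  rw [List.getElem?_drop] at h0
  simp only [Nat.add_zero] at h0
  simp [List.getD_eq_getElem?_getD, h0]
lemma drop_succ_of_drop_cons {l : List Nat} {k p : Nat} {rest : List Nat}
    (h : l.drop k = p :: rest) : l.drop (k + 1) = rest := by
  have : l.drop (k + 1) = (l.drop k).drop 1 := by
    rw [List.drop_drop]
  rw [this, h, List.drop_one]
  rfl
lemma pySwap_eq (a : List Int) (j m : Nat) :
    pySwap a (j : Int) (m : Int) = (a.set j (a.getD m 0)).set m (a.getD j 0) := by
  unfold pySwap
  simp [PySem.List.pySetD_natCast, PySem.List.pyGetD_natCast]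
lemma swap_getD (a : List Int) (j m : Nat) (hj : j < a.length) (hm : m < a.length) (i : Nat) :
    ((a.set j (a.getD m 0)).set m (a.getD j 0)).getD i 0
    = if i = m then a.getD j 0 else if i = j then a.getD m 0 else a.getD i 0 := by
  rw [getD_set _ m _ i (by simpa using hm), getD_set _ j _ i hj]
lemma condA_swap (a : List Int) (j p0 : Nat)
    (hjl : j < a.length) (hp1 : p0 + 1 < a.length)
    (haj : a.getD j 0 = 5)
    (hap : a.getD p0 0 = 4)
    (hap1_4 : a.getD (p0 + 1) 0 ≠ 4) (hap1_5 : a.getD (p0 + 1) 0 ≠ 5)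
    (hprev : j = 0 ∨ a.getD (j - 1) 0 ≠ 4) :
    ∀ i : Nat,
      condA ((a.set j (a.getD (p0 + 1) 0)).set (p0 + 1) (a.getD j 0)) i
      = (condA a i && !(i == p0)) := by
  have hjp0 : j ≠ p0 := by intro e; rw [e, hap] at haj; norm_num at haj
  have hjp1 : j ≠ p0 + 1 := by
    intro e
    rcases hprev with h0 | hne
    · omega
    · apply hne; rw [show j - 1 = p0 by omega]; exact hap
  have e1 : (a.getD (p0 + 1) 0 == 4) = false := beq_eq_false_iff_ne.mpr hap1_4
  have e3 : (a.getD j 0 == 4) = false := by rw [haj]; rfl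
  have e4 : (a.getD j 0 != 5) = false := by rw [haj]; rfl
  have e5 : (a.getD p0 0 == 4) = true := by rw [hap]; rfl
  intro i
  unfold condA
  rw [swap_getD a j (p0 + 1) hjl hp1 i, swap_getD a j (p0 + 1) hjl hp1 (i + 1)]
  by_cases h1 : i = p0 + 1
  · rw [if_pos h1, haj]
    have t1 : (a.getD i 0 == 4) = false := by rw [h1]; exact e1
    simp only [show ((5 : Int) == 4) = false from rfl, t1, Bool.false_and]
  · rw [if_neg h1]
    by_cases h2 : i = j
    · rw [if_pos h2]
      have t1 : (a.getD i 0 == 4) = false := by rw [h2]; exact e3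
      simp only [e1, t1, Bool.false_and]
    · rw [if_neg h2]
      by_cases h4 : i = p0
      · rw [if_pos (by omega), haj]
        have t1 : (i == p0) = true := beq_iff_eq.mpr h4
        simp only [show ((5 : Int) != 5) = false from rfl, Bool.and_false, t1,
          Bool.not_true]
      · rw [if_neg (by omega)]
        by_cases h5 : i + 1 = j
        · rw [if_pos h5]
          have hi4 : (a.getD i 0 == 4) = false := by
            rcases hprev with h0 | hne
            · omega
            · refine beq_eq_false_iff_ne.mpr ?_
              rw [show i = j - 1 by omega]; exact hne
          have h15 : (a.getD (i + 1) 0 != 5) = false := by rw [h5]; exact e4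
          simp only [hi4, h15, Bool.false_and, Bool.and_false]
        · rw [if_neg h5]
          have t1 : (i == p0) = false := beq_eq_false_iff_ne.mpr h4
          simp only [t1, Bool.not_false, Bool.and_true]
lemma stepA_of_true {a : List Int} {j : Int}
    (hb : (PySem.List.pyGetD a (j - 1) 0 != 4) = true) :
    stepA a j = (match (availN a).map (fun (k : Nat) => (k : Int)) with
                 | [] => a
                 | p :: _ => pySwap a j (p + 1)) := by
  unfold stepA
  rw [avail_of_enum a, hb]
  simp
lemma stepA_of_false {a : List Int} {j : Int}
    (hb : (PySem.List.pyGetD a (j - 1) 0 != 4) = false) :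
    stepA a j = a := by
  unfold stepA
  rw [hb]
  simp
lemma loop_eq (nums : List Int) (hpre : Pre_fix_45 nums) :
    ∀ (rem : List Nat) (a : List Int) (k : Nat),
      List.Pairwise (· < ·) rem →
      a.length = nums.length →
      (∀ i, i < nums.length → (a.getD i 0 = 4 ↔ nums.getD i 0 = 4)) →
      availN a = (availN nums).drop k →
      (∀ j ∈ rem, j < nums.length ∧ nums.getD j 0 = 5 ∧
          ((j = 0 ∨ nums.getD (j - 1) 0 ≠ 4) → a.getD j 0 = 5)) →
      (rem.map (fun (j : Nat) => (j : Int))).foldl stepA a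
      = ((rem.map (fun (j : Nat) => (j : Int))).foldl
          (stepB ((availN nums).map (fun (k : Nat) => (k : Int)))) (a, k)).1 := by
  intro rem
  induction rem with
  | nil => intro a k _ _ _ _ _; rfl
  | cons j rem ih =>
    intro a k hpair hlen h4 hav hrem
    obtain ⟨hjlt, hj5, ha5i⟩ := hrem j (List.mem_cons_self)
    have hjl' : j < a.length := by omega
    have hn0 : 0 < nums.length := by omega
    have hlast4 : a.getD (a.length - 1) 0 ≠ 4 := by
      intro h
      have h' := (h4 (a.length - 1) (by omega)).mp h
      rw [hlen] at h'
      have := hpre (nums.length - 1) (by omega) h'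
      omega
    simp only [List.map_cons, List.foldl_cons]
    by_cases hfire : j = 0 ∨ a.getD (j - 1) 0 ≠ 4
    · -- the 5 at j is not already preceded by a 4
      have ha5 : a.getD j 0 = 5 := by
        apply ha5i
        rcases hfire with h0 | hne
        · exact Or.inl h0
        · by_cases hj0 : j = 0
          · exact Or.inl hj0
          · exact Or.inr (fun hc => hne (((h4 (j - 1) (by omega)).mpr hc)))
      have hbA : (PySem.List.pyGetD a ((j : Int) - 1) 0 != 4) = true := by
        apply bne_iff_ne.mpr
        by_cases hj0 : j = 0
        · subst hj0
          rw [show ((0 : Nat) : Int) - 1 = -1 by norm_num,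
            PySem.List.pyGetD_neg_one a 0 (by intro h; rw [h] at hjl'; simp at hjl')]
          rw [List.getLast_eq_getElem]
          rw [← List.getD_eq_getElem a 0 (by omega)]
          exact hlast4
        · rw [show ((j : Int) - 1) = ((j - 1 : Nat) : Int) by omega,
            PySem.List.pyGetD_natCast]
          rcases hfire with h0 | hne
          · omega
          · exact hne
      have hguardB : (((j : Int) == 0) || (PySem.List.pyGetD a ((j : Int) - 1) 0 != 4)) = true := by
        rw [hbA]; simp
      by_cases hk : k < (availN nums).length
      · obtain ⟨p0, rest, hcons⟩ : ∃ p0 rest, (availN nums).drop k = p0 :: rest := by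
          cases h : (availN nums).drop k with
          | nil =>
            exfalso
            have := List.drop_eq_nil_iff.mp h
            omega
          | cons p0 rest => exact ⟨p0, rest, rfl⟩
        have haveq : availN a = p0 :: rest := hav.trans hcons
        obtain ⟨hp0l, hap0, hap0_5⟩ := mem_availN a p0 (by rw [haveq]; exact List.mem_cons_self)
        have hnum_p0 : nums.getD p0 0 = 4 := (h4 p0 (by omega)).mp hap0
        obtain ⟨hp1n, hnum_p1⟩ := hpre p0 (by omega) hnum_p0
        have hp1' : p0 + 1 < a.length := by omega
        have hap1_4 : a.getD (p0 + 1) 0 ≠ 4 := fun hc => hnum_p1 ((h4 (p0 + 1) (by omega)).mp hc)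
        -- both sides perform the same swap
        have hsw : pySwap a (j : Int) ((p0 : Int) + 1)
            = (a.set j (a.getD (p0 + 1) 0)).set (p0 + 1) (a.getD j 0) := by
          rw [show ((p0 : Int) + 1) = ((p0 + 1 : Nat) : Int) by push_cast; ring, pySwap_eq]
        have hA : stepA a (j : Int) = (a.set j (a.getD (p0 + 1) 0)).set (p0 + 1) (a.getD j 0) := by
          rw [stepA_of_true hbA, haveq]
          simpa using hsw
        have hgetk : PySem.List.pyGetD ((availN nums).map (fun (k : Nat) => (k : Int))) (k : Int) 0
            = (p0 : Int) := by
          rw [PySem.List.pyGetD_natCast]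
          rw [List.getD_eq_getElem _ _ (by simpa using hk), List.getElem_map]
          have := drop_cons_getD hcons
          rw [List.getD_eq_getElem _ _ hk] at this
          exact_mod_cast this
        have hB : stepB ((availN nums).map (fun (k : Nat) => (k : Int))) (a, k) (j : Int)
            = ((a.set j (a.getD (p0 + 1) 0)).set (p0 + 1) (a.getD j 0), k + 1) := by
          unfold stepB
          rw [hguardB]
          simp only [List.length_map, hgetk, Bool.true_and]
          rw [if_pos (by simpa using hk)]
          rw [hsw]
        rw [hA, hB]
        -- re-establish the invariants and apply the induction hypothesis
        have hlen' : ((a.set j (a.getD (p0 + 1) 0)).set (p0 + 1) (a.getD j 0)).length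
            = nums.length := by simp [List.length_set, hlen]
        apply ih _ (k + 1) hpair.of_cons hlen'
        · intro i hi
          rw [swap_getD a j (p0 + 1) hjl' hp1' i]
          by_cases hA1 : i = p0 + 1
          · rw [if_pos hA1, ha5]
            exact iff_of_false (by norm_num) (by rw [hA1]; exact hnum_p1)
          · rw [if_neg hA1]
            by_cases hA2 : i = j
            · rw [if_pos hA2]
              exact iff_of_false hap1_4 (by rw [hA2, hj5]; norm_num)
            · rw [if_neg hA2]; exact h4 i hi
        · -- availN after the swap
          have hc := condA_swap a j p0 hjl' hp1' ha5 hap0 hap1_4 hap0_5 hfire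
          have hlen2 : ((a.set j (a.getD (p0 + 1) 0)).set (p0 + 1) (a.getD j 0)).length
              = a.length := by simp [List.length_set]
          unfold availN
          rw [hlen2]
          rw [show (condA ((a.set j (a.getD (p0 + 1) 0)).set (p0 + 1) (a.getD j 0)))
              = (fun i => condA a i && !(i == p0)) from funext hc]
          rw [← List.filter_filter, List.filter_comm]
          have : (List.range a.length).filter (condA a) = availN a := rfl
          rw [this, haveq]
          have hnd := nodup_availN a
          rw [haveq] at hnd
          have hp0rest : p0 ∉ rest := (List.nodup_cons.mp hnd).1
          rw [List.filter_cons]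
          simp only [beq_self_eq_true, Bool.not_true, if_false]
          rw [List.filter_eq_self.mpr (fun x hx => by
            have hne : x ≠ p0 := fun he => hp0rest (by rw [← he]; exact hx)
            simp [hne])]
          exact (drop_succ_of_drop_cons hcons).symm
        · intro i hi
          obtain ⟨hilt, hi5, himp⟩ := hrem i (List.mem_cons_of_mem _ hi)
          refine ⟨hilt, hi5, fun hcondi => ?_⟩
          have hij : j < i := (List.pairwise_cons.mp hpair).1 i hi
          rw [swap_getD a j (p0 + 1) hjl' hp1' i]
          by_cases hA1 : i = p0 + 1
          · exfalso
            rcases hcondi with h0 | hne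
            · omega
            · exact hne (by rw [show i - 1 = p0 by omega]; exact hnum_p0)
          · rw [if_neg hA1, if_neg (by omega)]
            exact himp hcondi
      · -- no available 4 left: both sides leave the state unchanged
        have hnil : availN a = [] := by
          rw [hav]
          exact List.drop_eq_nil_iff.mpr (by omega)
        have hA : stepA a (j : Int) = a := by
          rw [stepA_of_true hbA, hnil]; rfl
        have hB : stepB ((availN nums).map (fun (k : Nat) => (k : Int))) (a, k) (j : Int) = (a, k) := by
          unfold stepB
          have h2 : decide (k < ((availN nums).map (fun (k : Nat) => (k : Int))).length) = false := by
            simp only [List.length_map]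
            exact decide_eq_false (by omega)
          rw [h2, Bool.and_false]
          simp
        rw [hA, hB]
        exact ih a k hpair.of_cons hlen h4 hav (fun i hi => hrem i (List.mem_cons_of_mem _ hi))
    · -- a 4 sits right before this 5: nothing happens on either side
      push_neg at hfire
      obtain ⟨hj0, hprev4⟩ := hfire
      have hbA : (PySem.List.pyGetD a ((j : Int) - 1) 0 != 4) = false := by
        rw [show ((j : Int) - 1) = ((j - 1 : Nat) : Int) by omega, PySem.List.pyGetD_natCast,
          hprev4]
        rfl
      have hA : stepA a (j : Int) = a := stepA_of_false hbA
      have hB : stepB ((availN nums).map (fun (k : Nat) => (k : Int))) (a, k) (j : Int) = (a, k) := by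
        unfold stepB
        rw [hbA]
        have : ((j : Int) == 0) = false := by
          apply beq_eq_false_iff_ne.mpr
          exact_mod_cast hj0
        rw [this]
        simp
      rw [hA, hB]
      exact ih a k hpair.of_cons hlen h4 hav (fun i hi => hrem i (List.mem_cons_of_mem _ hi))
-- ===== VERDICT (by name: the statement is the Claim_ definition above) =====
theorem fix_45_spec : Claim_equal_fix_45 := by
  intro nums _hdom hpre
  unfold Spec_fix_45
  rw [fix_45_eq, fix_45_alt_eq nums hpre]
  exact loop_eq nums hpre (fivesN nums) nums 0
    (List.Pairwise.filter _ (List.pairwise_lt_range))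
    rfl (fun i _ => Iff.rfl) rfl
    (by
      intro j hj
      have h := List.mem_filter.mp hj
      have hlt : j < nums.length := List.mem_range.mp h.1
      have h5 : nums.getD j 0 = 5 := by simpa using h.2
      exact ⟨hlt, h5, fun _ => h5⟩)
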